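-- pv_equiv track=rewrite | github.com/NethmiR/car-price-predictor-214172V | app.py | extract_brand_models
-- ===== SOURCE A (Python) =====
-- def extract_brand_models(feature_names):
--     """Extract available models from feature names and map to brands"""
--     model_features = [f.replace('model_', '') for f in feature_names if f.startswith('model_')]
--
--     # Add the reference category (A-Star) which was dropped during encoding
--     all_models = ['A-Star'] + model_features
--
--     # Brand to Model mapping (based on actual car manufacturers)
--     brand_model_mapping = {
--         'Toyota': ['Aqua', 'Glanza', 'Passo', 'Pixis', 'Roomy', 'Vitz', 'Yaris'],
--         'Suzuki': ['A-Star', 'Alto', 'Baleno', 'Celerio', 'Wagon R'],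
--         'Honda': ['Fit'],
--         'Nissan': ['Dayz', 'March', 'Moco', 'Roox'],
--         'Mitsubishi': ['Miraa'],
--         'Daihatsu': ['Move', 'Taft']
--     }
--
--     # Filter only models that exist in our dataset
--     filtered_mapping = {}
--     for brand, models in brand_model_mapping.items():
--         available = [m for m in models if m in all_models]
--         if available:
--             filtered_mapping[brand] = sorted(available)
--
--     return filtered_mapping
-- ===== SOURCE B (Python) =====
-- def extract_brand_models(feature_names):
--     """Extract available models from feature names and map to brands"""
--     brand_model_mapping = {
--         'Toyota': ['Aqua', 'Glanza', 'Passo', 'Pixis', 'Roomy', 'Vitz', 'Yaris'],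
--         'Suzuki': ['A-Star', 'Alto', 'Baleno', 'Celerio', 'Wagon R'],
--         'Honda': ['Fit'],
--         'Nissan': ['Dayz', 'March', 'Moco', 'Roox'],
--         'Mitsubishi': ['Miraa'],
--         'Daihatsu': ['Move', 'Taft']
--     }
--     # reverse index: model name -> brand
--     brand_of = {m: b for b, ms in brand_model_mapping.items() for m in ms}
--     # available models (deduplicated), 'A-Star' is the dropped reference category
--     available = set(['A-Star'] + [f.replace('model_', '')
--                                   for f in feature_names if f.startswith('model_')])
--     # single pass over the available models in sorted order, grouping by brand
--     groups = {}
--     for m in sorted(available):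
--         b = brand_of.get(m)
--         if b is not None:
--             groups[b] = groups.get(b, []) + [m]
--     # re-emit in canonical brand order
--     return {b: groups[b] for b in brand_model_mapping if b in groups}
-- ===== Notes on version B (the rewrite author's own statement) =====
-- stated objective: alternative
-- what changed: Instead of scanning each brand's model list against the all_models list, B builds a reverse model-to-brand index once, walks the sorted set of available models in a single pass grouping them by brand, and re-emits the groups in brand order.
import Mathlib
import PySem

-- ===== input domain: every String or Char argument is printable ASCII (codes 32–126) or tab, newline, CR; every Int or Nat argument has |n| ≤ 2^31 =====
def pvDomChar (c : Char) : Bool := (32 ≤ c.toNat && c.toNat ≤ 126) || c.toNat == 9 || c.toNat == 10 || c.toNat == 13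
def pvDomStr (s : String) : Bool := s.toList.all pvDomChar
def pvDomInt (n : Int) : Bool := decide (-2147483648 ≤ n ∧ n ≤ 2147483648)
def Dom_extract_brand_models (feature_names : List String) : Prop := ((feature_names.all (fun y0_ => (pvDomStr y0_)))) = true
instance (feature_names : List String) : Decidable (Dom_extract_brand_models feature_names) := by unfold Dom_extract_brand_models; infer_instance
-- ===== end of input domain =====

-- B replaces A's per-brand membership scans over all_models by a reverse model→brand index
-- consulted in one pass over the sorted set of available models (objective: alternative).

-- ===== PORT A =====
def extract_brand_models (feature_names : List String) : List (String × List String) :=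
  let model_features :=
    (feature_names.filter (fun f => PySem.Str.startswith f "model_")).map
      (fun f => PySem.Str.replace f "model_" "")
  let all_models := "A-Star" :: model_features
  let brand_model_mapping : List (String × List String) :=
    [("Toyota", ["Aqua", "Glanza", "Passo", "Pixis", "Roomy", "Vitz", "Yaris"]),
     ("Suzuki", ["A-Star", "Alto", "Baleno", "Celerio", "Wagon R"]),
     ("Honda", ["Fit"]),
     ("Nissan", ["Dayz", "March", "Moco", "Roox"]),
     ("Mitsubishi", ["Miraa"]),
     ("Daihatsu", ["Move", "Taft"])]
  let filtered_mapping :=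
    brand_model_mapping.foldl (fun fm p =>
      let available := p.2.filter (fun m => all_models.contains m)
      if available ≠ [] then fm.insert p.1 (PySem.List.sorted available (fun x => x) false)
      else fm) PySem.Dict.empty
  filtered_mapping.items


-- ===== PORT B =====
def pvAltMapping : List (String × List String) :=
  [("Toyota", ["Aqua", "Glanza", "Passo", "Pixis", "Roomy", "Vitz", "Yaris"]),
   ("Suzuki", ["A-Star", "Alto", "Baleno", "Celerio", "Wagon R"]),
   ("Honda", ["Fit"]),
   ("Nissan", ["Dayz", "March", "Moco", "Roox"]),
   ("Mitsubishi", ["Miraa"]),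
   ("Daihatsu", ["Move", "Taft"])]
def pvBrandOf : PySem.Dict String String :=
  pvAltMapping.foldl (fun d p => p.2.foldl (fun d m => d.insert m p.1) d) PySem.Dict.empty


def extract_brand_models_alt (feature_names : List String) : List (String × List String) :=
  let available : PySem.Set String :=
    PySem.Set.ofList ("A-Star" ::
      (feature_names.filter (fun f => PySem.Str.startswith f "model_")).map
        (fun f => PySem.Str.replace f "model_" ""))
  let groups :=
    (PySem.List.sorted available (fun x => x) false).foldl (fun g m =>
      match pvBrandOf.get? m with
      | some b => g.modify b [] (fun l => l ++ [m])
      | none => g) PySem.Dict.empty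
  (pvAltMapping.foldl (fun out p =>
      match groups.get? p.1 with
      | some v => out.insert p.1 v
      | none => out) PySem.Dict.empty).items

-- ===== PRECONDITION & SPEC =====
def Spec_extract_brand_models (feature_names : List String) (out : List (String × List String)) : Prop := out = extract_brand_models_alt feature_names
instance (feature_names : List String) (out : List (String × List String)) : Decidable (Spec_extract_brand_models feature_names out) := by unfold Spec_extract_brand_models; infer_instance

-- ===== CLAIM (what is proved, stated in full; the proofs are below) =====
def Claim_equal_extract_brand_models : Prop := ∀ (feature_names : List String), Dom_extract_brand_models feature_names → Spec_extract_brand_models feature_names (extract_brand_models feature_names)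

-- ===== LEMMAS AND PROOFS =====

theorem pvGroups_getD (xs : List String) (g : PySem.Dict String (List String)) (b : String) :
    (xs.foldl (fun g m =>
      match pvBrandOf.get? m with
      | some b => g.modify b [] (fun l => l ++ [m])
      | none => g) g).getD b []
    = g.getD b [] ++ xs.filter (fun m => pvBrandOf.get? m == some b) := by
  induction xs generalizing g with
  | nil => simp
  | cons m xs ih =>
    simp only [List.foldl_cons, List.filter_cons]
    cases hm : pvBrandOf.get? m with
    | none => rw [ih]; simp
    | some b' =>
      rw [ih]
      by_cases hb : b' = b
      · subst hb
        rw [PySem.Dict.getD_modify]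
        simp
      · rw [PySem.Dict.getD_modify]
        simp [hb, Ne.symm hb]

theorem pvGroups_contains (xs : List String) (g : PySem.Dict String (List String)) (b : String) :
    (xs.foldl (fun g m =>
      match pvBrandOf.get? m with
      | some b => g.modify b [] (fun l => l ++ [m])
      | none => g) g).contains b
    = (g.contains b || xs.any (fun m => pvBrandOf.get? m == some b)) := by
  induction xs generalizing g with
  | nil => simp
  | cons m xs ih =>
    simp only [List.foldl_cons, List.any_cons]
    cases hm : pvBrandOf.get? m with
    | none => rw [ih]; simp
    | some b' =>
      rw [ih, PySem.Dict.contains_modify]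
      by_cases hb : b = b'
      · subst hb; simp
      · have h1 : (b == b') = false := by simp [hb]
        have h2 : (b' == b) = false := by simp [Ne.symm hb]
        simp [h1, h2]

theorem pvGroups_get? (xs : List String) (b : String) :
    (xs.foldl (fun g m =>
      match pvBrandOf.get? m with
      | some b => g.modify b [] (fun l => l ++ [m])
      | none => g) PySem.Dict.empty).get? b
    = (if xs.filter (fun m => pvBrandOf.get? m == some b) = [] then none
       else some (xs.filter (fun m => pvBrandOf.get? m == some b))) := by
  have hc := pvGroups_contains xs PySem.Dict.empty b
  have hd := pvGroups_getD xs PySem.Dict.empty b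
  rw [PySem.Dict.contains_eq_isSome_get?] at hc
  cases o : (xs.foldl (fun g m =>
      match pvBrandOf.get? m with
      | some b => g.modify b [] (fun l => l ++ [m])
      | none => g) PySem.Dict.empty).get? b with
  | none =>
    rw [o] at hc
    simp only [Option.isSome_none, PySem.Dict.contains_empty, Bool.false_or] at hc
    have hnil : xs.filter (fun m => pvBrandOf.get? m == some b) = [] := by
      rw [List.filter_eq_nil_iff]
      intro a ha
      have := List.any_eq_false.mp (Eq.symm hc) a ha  -- hc : false = any ?
      simpa using this
    rw [if_pos hnil]
  | some v =>
    rw [o] at hc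
    simp only [Option.isSome_some, PySem.Dict.contains_empty, Bool.false_or] at hc
    have hne : xs.filter (fun m => pvBrandOf.get? m == some b) ≠ [] := by
      intro hnil
      rw [List.filter_eq_nil_iff] at hnil
      rcases List.any_eq_true.mp (Eq.symm hc) with ⟨a, ha, hp⟩
      exact hnil a ha hp
    rw [if_neg hne]
    rw [PySem.Dict.getD_eq_get?_getD, o] at hd
    simp only [PySem.Dict.getD_empty, Option.getD_some, List.nil_append] at hd
    rw [hd]

theorem pvEq_of_pairwise_lt (l₁ l₂ : List String)
    (h1 : l₁.Pairwise (· < ·)) (h2 : l₂.Pairwise (· < ·))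
    (hm : ∀ x, x ∈ l₁ ↔ x ∈ l₂) : l₁ = l₂ := by
  have n1 : l₁.Nodup := List.Pairwise.imp (fun h => ne_of_lt h) h1
  have n2 : l₂.Nodup := List.Pairwise.imp (fun h => ne_of_lt h) h2
  have hp : l₁.Perm l₂ := (List.perm_ext_iff_of_nodup n1 n2).mpr hm
  exact hp.eq_of_pairwise (fun a b _ _ hab hba => absurd hba (lt_asymm hab)) h1 h2

theorem pvRow_sorted (b : String) (ms : List String) (h : (b, ms) ∈ pvAltMapping) :
    ms.Pairwise (· < ·) := by
  simp only [pvAltMapping, List.mem_cons, List.not_mem_nil, or_false, Prod.mk.injEq] at h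
  rcases h with ⟨rfl, rfl⟩|⟨rfl, rfl⟩|⟨rfl, rfl⟩|⟨rfl, rfl⟩|⟨rfl, rfl⟩|⟨rfl, rfl⟩ <;>
    (simp [String.lt_iff_toList_lt] <;> decide)

def pvAllModels : List String :=
  ["Aqua", "Glanza", "Passo", "Pixis", "Roomy", "Vitz", "Yaris",
   "A-Star", "Alto", "Baleno", "Celerio", "Wagon R", "Fit",
   "Dayz", "March", "Moco", "Roox", "Miraa", "Move", "Taft"]

theorem pvBrandOf_keys : pvBrandOf.keys = pvAllModels := by decide

theorem pvBrand_char (b : String) (ms : List String) (h : (b, ms) ∈ pvAltMapping) (x : String) :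
    pvBrandOf.get? x = some b ↔ x ∈ ms := by
  constructor
  · intro hx
    have hk : x ∈ pvAllModels := by
      rw [← pvBrandOf_keys]
      by_contra hc
      rw [← PySem.Dict.get?_eq_none_iff_not_mem_keys] at hc
      rw [hc] at hx; simp at hx
    simp only [pvAllModels, List.mem_cons, List.not_mem_nil, or_false] at hk
    simp only [pvAltMapping, List.mem_cons, List.not_mem_nil, or_false, Prod.mk.injEq] at h
    rcases h with ⟨rfl, rfl⟩|⟨rfl, rfl⟩|⟨rfl, rfl⟩|⟨rfl, rfl⟩|⟨rfl, rfl⟩|⟨rfl, rfl⟩ <;>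
      rcases hk with rfl|rfl|rfl|rfl|rfl|rfl|rfl|rfl|rfl|rfl|rfl|rfl|rfl|rfl|rfl|rfl|rfl|rfl|rfl|rfl <;>
      first
        | decide
        | exact absurd hx (by decide)
  · intro hm
    simp only [pvAltMapping, List.mem_cons, List.not_mem_nil, or_false, Prod.mk.injEq] at h
    rcases h with ⟨rfl, rfl⟩|⟨rfl, rfl⟩|⟨rfl, rfl⟩|⟨rfl, rfl⟩|⟨rfl, rfl⟩|⟨rfl, rfl⟩ <;>
      · simp only [List.mem_cons, List.not_mem_nil, or_false] at hm
        rcases hm with rfl|rfl|rfl|rfl|rfl|rfl|rfl <;> decide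

theorem pvFilt (mf : List String) (b : String) (ms : List String) (h : (b, ms) ∈ pvAltMapping) :
    (PySem.List.sorted (PySem.Set.ofList ("A-Star" :: mf)) (fun x => x) false).filter
      (fun m => pvBrandOf.get? m == some b)
    = ms.filter (fun m => ("A-Star" :: mf).contains m) := by
  apply pvEq_of_pairwise_lt
  · exact List.Pairwise.filter _ (PySem.List.sorted_ofList_pairwise_lt _)
  · exact List.Pairwise.filter _ (pvRow_sorted b ms h)
  · intro x
    simp only [List.mem_filter, PySem.List.mem_sorted, PySem.Set.mem_ofList,
      beq_iff_eq, pvBrand_char b ms h x, List.contains_iff_mem]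
    tauto

theorem pvRow_filter_sorted (b : String) (ms : List String) (h : (b, ms) ∈ pvAltMapping)
    (p : String → Bool) :
    PySem.List.sorted (ms.filter p) (fun x => x) = ms.filter p :=
  PySem.List.sorted_eq_self_of_pairwise _ _
    ((List.Pairwise.filter p (pvRow_sorted b ms h)).imp (fun hlt => le_of_lt hlt))

theorem pvMatch_ite (c : Prop) [Decidable c] (acc : PySem.Dict String (List String))
    (b : String) (v : List String) :
    (match (if c then none else some v : Option (List String)) with
     | some v => acc.insert b v
     | none => acc) = if c then acc else acc.insert b v := by
  split_ifs <;> rfl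

theorem pvMain (fn : List String) : extract_brand_models fn = extract_brand_models_alt fn := by
  unfold extract_brand_models extract_brand_models_alt
  simp only [pvAltMapping, List.foldl_cons, List.foldl_nil]
  rw [pvGroups_get?, pvGroups_get?, pvGroups_get?, pvGroups_get?, pvGroups_get?, pvGroups_get?]
  rw [pvFilt _ "Toyota" ["Aqua", "Glanza", "Passo", "Pixis", "Roomy", "Vitz", "Yaris"] (by decide),
      pvFilt _ "Suzuki" ["A-Star", "Alto", "Baleno", "Celerio", "Wagon R"] (by decide),
      pvFilt _ "Honda" ["Fit"] (by decide),
      pvFilt _ "Nissan" ["Dayz", "March", "Moco", "Roox"] (by decide),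
      pvFilt _ "Mitsubishi" ["Miraa"] (by decide),
      pvFilt _ "Daihatsu" ["Move", "Taft"] (by decide)]
  rw [pvRow_filter_sorted "Toyota" ["Aqua", "Glanza", "Passo", "Pixis", "Roomy", "Vitz", "Yaris"] (by decide),
      pvRow_filter_sorted "Suzuki" ["A-Star", "Alto", "Baleno", "Celerio", "Wagon R"] (by decide),
      pvRow_filter_sorted "Honda" ["Fit"] (by decide),
      pvRow_filter_sorted "Nissan" ["Dayz", "March", "Moco", "Roox"] (by decide),
      pvRow_filter_sorted "Mitsubishi" ["Miraa"] (by decide),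
      pvRow_filter_sorted "Daihatsu" ["Move", "Taft"] (by decide)]
  simp only [ne_eq, ite_not, pvMatch_ite]

-- ===== VERDICT (by name: the statement is the Claim_ definition above) =====
theorem extract_brand_models_spec : Claim_equal_extract_brand_models := by
  intro fn _
  unfold Spec_extract_brand_models
  exact pvMain fn
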